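-- pv_equiv track=rewrite | github.com/surajcodesml/CSAT | utils/util.py | folding
-- ===== SOURCE A (Python) =====
-- def folding(pid, tid, fold=3):
--
-- 	q, rem = divmod(len(pid), fold)
--
-- 	fold_pid = []
-- 	fold_tid = []
--
-- 	for i in range(fold):
-- 		r = rem*(i==fold-1)
-- 		this_fold = pid[i*q: i*q+q+r]
--
-- 		this_test = [t for t in tid if t[:-2] in this_fold]
--
-- 		fold_pid.append(this_fold)
-- 		fold_tid.append(this_test)
--
-- 	return fold_pid, fold_tid
-- ===== SOURCE B (Python) =====
-- def folding(pid, tid, fold=3):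
--     q, rem = divmod(len(pid), fold)
--     fold_pid = [pid[i*q: i*q + q + rem*(i == fold-1)] for i in range(fold)]
--     # inverted index: pid value -> list of fold indices whose slice contains it
--     index = {}
--     for i, fp in enumerate(fold_pid):
--         for p in dict.fromkeys(fp):
--             index.setdefault(p, []).append(i)
--     fold_tid = [[] for _ in range(fold)]
--     for t in tid:
--         for i in index.get(t[:-2], ()):
--             fold_tid[i].append(t)
--     return fold_pid, fold_tid
-- ===== Notes on version B (the rewrite author's own statement) =====
-- stated objective: faster
-- what changed: Instead of re-scanning tid once per fold with a linear 'in slice' membership test, B builds one inverted index (dict: pid value -> list of fold indices whose slice contains it) and makes a single pass over tid, appending each t to every matching fold.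
import Mathlib
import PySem

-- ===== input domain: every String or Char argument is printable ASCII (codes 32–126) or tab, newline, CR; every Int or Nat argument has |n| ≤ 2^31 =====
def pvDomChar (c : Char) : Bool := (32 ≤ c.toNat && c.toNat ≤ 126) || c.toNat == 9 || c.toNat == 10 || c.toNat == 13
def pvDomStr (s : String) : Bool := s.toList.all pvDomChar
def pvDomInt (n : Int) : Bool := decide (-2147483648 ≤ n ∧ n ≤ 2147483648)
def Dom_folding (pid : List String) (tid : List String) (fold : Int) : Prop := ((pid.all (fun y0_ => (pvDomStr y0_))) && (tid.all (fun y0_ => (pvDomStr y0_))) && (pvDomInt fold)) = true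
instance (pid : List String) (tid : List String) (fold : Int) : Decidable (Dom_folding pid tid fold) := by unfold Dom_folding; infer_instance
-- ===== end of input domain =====

-- B replaces A's per-fold scan of tid (membership via a linear 'in slice' test) by one inverted
-- index from pid value to the fold indices containing it plus a single pass over tid (objective: faster).


-- ===== PORT A =====
-- literal transliteration of A: one loop over range(fold); each iteration slices pid and
-- filters tid by 't[:-2] in this_fold', appending both to the accumulated pair of lists.
def folding (pid : List String) (tid : List String) (fold : Int) : List (List String) × List (List String) :=
  let q := PySem.Int.floordiv (pid.length : Int) fold
  let rem := PySem.Int.mod (pid.length : Int) fold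
  (PySem.List.pyRange 0 fold 1).foldl
    (fun acc i =>
      let r := rem * (if i == fold - 1 then 1 else 0)
      let thisFold := PySem.List.slice pid (some (i * q)) (some (i * q + q + r))
      let thisTest := tid.filter (fun t => thisFold.contains (PySem.Str.slice t none (some (-2))))
      (acc.1 ++ [thisFold], acc.2 ++ [thisTest]))
    ([], [])

-- ===== PORT B =====
-- t[:-2]
def pvKey (t : String) : String := PySem.Str.slice t none (some (-2))

-- for i, fp in enumerate(fold_pid): for p in dict.fromkeys(fp): index.setdefault(p, []).append(i)
-- (setdefault(p, []).append(i) ≡ index[p] = index.get(p, []) + [i]: same position on overwrite, appended if fresh)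
def pvBuildIndex (foldPid : List (List String)) : PySem.Dict String (List Int) :=
  (PySem.List.enumerate foldPid 0).foldl
    (fun d q => (PySem.List.dedup q.2).foldl (fun d p => d.modify p [] (· ++ [q.1])) d)
    PySem.Dict.empty

-- fold_tid[i].append(t); exact for 0 ≤ i < len(fold_tid), which holds for every index the dict stores
def pvAppendAt (xss : List (List String)) (i : Int) (t : String) : List (List String) :=
  xss.mapIdx (fun j l => if (j : Int) = i then l ++ [t] else l)

def folding_alt (pid : List String) (tid : List String) (fold : Int) : List (List String) × List (List String) :=
  let q := PySem.Int.floordiv (pid.length : Int) fold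
  let rem := PySem.Int.mod (pid.length : Int) fold
  let foldPid := (PySem.List.pyRange 0 fold 1).map (fun i =>
    PySem.List.slice pid (some (i * q)) (some (i * q + q + rem * (if i == fold - 1 then 1 else 0))))
  let index := pvBuildIndex foldPid
  let foldTid := tid.foldl
    (fun acc t => ((index.getD (pvKey t) []).foldl (fun acc i => pvAppendAt acc i t) acc))
    ((PySem.List.pyRange 0 fold 1).map (fun _ => ([] : List String)))
  (foldPid, foldTid)

-- ===== PRECONDITION & SPEC =====
-- fold = 0 makes Python's divmod raise ZeroDivisionError; Pre_ excludes exactly that.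
def Pre_folding (pid : List String) (tid : List String) (fold : Int) : Prop := fold ≠ 0
instance (pid : List String) (tid : List String) (fold : Int) : Decidable (Pre_folding pid tid fold) := by unfold Pre_folding; infer_instance

def pvWitness_folding : List String × List String × Int := (["a", "bb", "c"], ["a01", "bb02", "zz"], 2)

def Spec_folding (pid : List String) (tid : List String) (fold : Int) (out : List (List String) × List (List String)) : Prop := out = folding_alt pid tid fold
instance (pid : List String) (tid : List String) (fold : Int) (out : List (List String) × List (List String)) : Decidable (Spec_folding pid tid fold out) := by unfold Spec_folding; infer_instance

-- ===== CLAIM (what is proved, stated in full; the proofs are below) =====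
def Claim_equal_folding : Prop := ∀ (pid : List String) (tid : List String) (fold : Int), Dom_folding pid tid fold → Pre_folding pid tid fold → Spec_folding pid tid fold (folding pid tid fold)

-- ===== LEMMAS AND PROOFS =====

-- the list of slices both ports produce as fold_pid
def pvSlices (pid : List String) (fold : Int) : List (List String) :=
  (PySem.List.pyRange 0 fold 1).map (fun i =>
    PySem.List.slice pid (some (i * PySem.Int.floordiv (pid.length : Int) fold))
      (some (i * PySem.Int.floordiv (pid.length : Int) fold + PySem.Int.floordiv (pid.length : Int) fold
        + PySem.Int.mod (pid.length : Int) fold * (if i == fold - 1 then 1 else 0))))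

-- the fold-index list B's dict maps a pid value to
def pvIdxList (S : List (List String)) (c : String) : List Int :=
  ((PySem.List.enumerate S 0).filter (fun q => q.2.contains c)).map (·.1)

theorem pv_filter_nodup (ss : List String) (c : String) (h : ss.Nodup) :
    ss.filter (fun x => x == c) = if c ∈ ss then [c] else [] := by
  induction ss with
  | nil => simp
  | cons x xs ih =>
    simp only [List.nodup_cons] at h
    by_cases hx : x = c
    · subst hx
      have hnil : xs.filter (fun a => a == x) = [] :=
        List.filter_eq_nil_iff.2 (fun a ha hac => absurd ((beq_iff_eq.mp hac) ▸ ha) h.1)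
      simp [hnil]
    · simp [hx, ih h.2, Ne.symm hx]

theorem pv_inner_getD (ss : List String) (hnd : ss.Nodup) (i : Int) (d : PySem.Dict String (List Int)) (c : String) :
    ((ss.foldl (fun d p => d.modify p [] (· ++ [i])) d).getD c []) = d.getD c [] ++ (if c ∈ ss then [i] else []) := by
  have h1 : ss.foldl (fun d p => d.modify p [] (· ++ [i])) d
      = (ss.map (fun p => (p, i))).foldl (fun d pr => d.modify pr.1 [] (· ++ [pr.2])) d := by
    rw [List.foldl_map]
  rw [h1, PySem.Dict.getD_foldl_modify_append]
  congr 1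
  rw [List.filter_map]
  have h2 : (fun (pr : String × Int) => pr.1 == c) ∘ (fun p => (p, i)) = fun p => p == c := rfl
  rw [h2, pv_filter_nodup ss c hnd]
  by_cases hc : c ∈ ss <;> simp [hc]

theorem pv_outer_getD (L : List (Int × List String)) (d : PySem.Dict String (List Int)) (c : String) :
    ((L.foldl (fun d q => (PySem.List.dedup q.2).foldl (fun d p => d.modify p [] (· ++ [q.1])) d) d).getD c [])
      = d.getD c [] ++ (L.filter (fun q => q.2.contains c)).map (·.1) := by
  induction L generalizing d with
  | nil => simp
  | cons q L ih =>
    rw [List.foldl_cons, ih, pv_inner_getD _ (PySem.List.nodup_dedup _) q.1 d c]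
    by_cases hc : c ∈ q.2
    · have hb : q.2.contains c = true := by simpa using hc
      simp [hb, hc]
    · have hb : q.2.contains c = false := by simpa using hc
      simp [hb, hc]

theorem pv_buildIndex_getD (S : List (List String)) (c : String) :
    (pvBuildIndex S).getD c [] = pvIdxList S c := by
  unfold pvBuildIndex pvIdxList
  rw [pv_outer_getD]
  simp

theorem pv_mem_idxList (S : List (List String)) (c : String) (j : Nat) :
    ((j : Int) ∈ pvIdxList S c) ↔ ∃ h : j < S.length, S[j].contains c := by
  unfold pvIdxList
  constructor
  · rintro hm
    rcases List.mem_map.1 hm with ⟨p, hp, hfst⟩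
    rcases List.mem_filter.1 hp with ⟨hmem, hcont⟩
    rcases (PySem.List.mem_enumerate_iff _ _ _).1 hmem with ⟨k, hk, rfl⟩
    simp only [] at hfst hcont
    have hjk : j = k := by omega
    subst hjk
    exact ⟨hk, by simpa using hcont⟩
  · rintro ⟨hj, hcont⟩
    refine List.mem_map.2 ⟨((j : Int), S[j]), List.mem_filter.2 ⟨?_, by simpa using hcont⟩, rfl⟩
    exact (PySem.List.mem_enumerate_iff _ _ _).2 ⟨j, hj, by simp⟩

theorem pv_nodup_idxList (S : List (List String)) (c : String) : (pvIdxList S c).Nodup := by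
  have hnd : ((PySem.List.enumerate S 0).map (·.1)).Nodup := by
    rw [PySem.List.map_fst_enumerate]
    exact PySem.List.nodup_pyRange_one _ _
  unfold pvIdxList
  exact hnd.sublist (List.Sublist.map Prod.fst List.filter_sublist)

theorem pv_appendAt_getElem? (xss : List (List String)) (i : Int) (t : String) (j : Nat) :
    (pvAppendAt xss i t)[j]? = xss[j]?.map (fun l => if (j : Int) = i then l ++ [t] else l) := by
  simp [pvAppendAt, List.getElem?_mapIdx]

theorem pv_foldl_appendAt (is : List Int) (hnd : is.Nodup) (t : String) (acc : List (List String)) (j : Nat) :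
    (is.foldl (fun a i => pvAppendAt a i t) acc)[j]? = acc[j]?.map (fun l => if (j : Int) ∈ is then l ++ [t] else l) := by
  induction is generalizing acc with
  | nil => cases h : acc[j]? <;> simp [h]
  | cons i is ih =>
    simp only [List.nodup_cons] at hnd
    rw [List.foldl_cons, ih hnd.2, pv_appendAt_getElem?]
    cases h : acc[j]? with
    | none => simp [h]
    | some l =>
      by_cases hji : (j : Int) = i
      · simp [h, hji, show i ∉ is from hji ▸ hnd.1]
      · by_cases hjs : (j : Int) ∈ is <;> simp [h, hji, hjs]

theorem pv_tid_loop (idx : String → List Int) (ts : List String) (hnd : ∀ t, (idx t).Nodup)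
    (acc : List (List String)) (j : Nat) :
    (ts.foldl (fun a t => (idx t).foldl (fun a i => pvAppendAt a i t) a) acc)[j]?
      = acc[j]?.map (fun lj => lj ++ ts.filter (fun t => (idx t).contains (j : Int))) := by
  induction ts generalizing acc with
  | nil => cases h : acc[j]? <;> simp [h]
  | cons t ts ih =>
    rw [List.foldl_cons, ih, pv_foldl_appendAt _ (hnd t)]
    cases h : acc[j]? with
    | none => simp [h]
    | some l =>
      by_cases hm : (j : Int) ∈ idx t
      · have hc : (idx t).contains (j : Int) = true := by simpa using hm
        simp [h, hm, hc]
      · have hc : (idx t).contains (j : Int) = false := by simpa using hm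
        simp [h, hm, hc]

theorem pv_foldl_pair (l : List Int) (f g : Int → List String) (acc : List (List String) × List (List String)) :
    l.foldl (fun acc i => (acc.1 ++ [f i], acc.2 ++ [g i])) acc = (acc.1 ++ l.map f, acc.2 ++ l.map g) := by
  induction l generalizing acc with
  | nil => simp
  | cons x xs ih => simp [ih]

theorem pv_folding_eq (pid tid : List String) (fold : Int) :
    folding pid tid fold
      = (pvSlices pid fold,
         (pvSlices pid fold).map (fun fp => tid.filter (fun t => fp.contains (pvKey t)))) := by
  unfold folding pvSlices pvKey
  rw [pv_foldl_pair]
  simp [List.map_map, Function.comp_def]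

theorem pv_contains_idxList (S : List (List String)) (c : String) (j : Nat) (hj : j < S.length) :
    (pvIdxList S c).contains (j : Int) = S[j].contains c := by
  cases hb : S[j].contains c with
  | true =>
    have : (j : Int) ∈ pvIdxList S c := (pv_mem_idxList S c j).2 ⟨hj, hb⟩
    simpa using this
  | false =>
    have : ¬ ((j : Int) ∈ pvIdxList S c) := by
      intro hm
      rcases (pv_mem_idxList S c j).1 hm with ⟨_, hc⟩
      rw [hb] at hc
      exact Bool.false_ne_true hc
    simpa using this

theorem pv_folding_alt_eq (pid tid : List String) (fold : Int) :
    folding_alt pid tid fold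
      = (pvSlices pid fold,
         (pvSlices pid fold).map (fun fp => tid.filter (fun t => fp.contains (pvKey t)))) := by
  have hdef : folding_alt pid tid fold
      = (pvSlices pid fold,
         tid.foldl
           (fun acc t => ((pvBuildIndex (pvSlices pid fold)).getD (pvKey t) []).foldl
             (fun acc i => pvAppendAt acc i t) acc)
           ((PySem.List.pyRange 0 fold 1).map (fun _ => ([] : List String)))) := rfl
  rw [hdef]
  refine Prod.ext rfl ?_
  show tid.foldl _ ((PySem.List.pyRange 0 fold 1).map (fun _ => ([] : List String))) = _
  apply List.ext_getElem?
  intro j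
  have hlen : ((PySem.List.pyRange 0 fold 1).map (fun _ => ([] : List String))).length
      = (pvSlices pid fold).length := by simp [pvSlices]
  rw [pv_tid_loop (fun t => (pvBuildIndex (pvSlices pid fold)).getD (pvKey t) [])
        tid (fun t => by simp only [pv_buildIndex_getD]; exact pv_nodup_idxList _ _)]
  by_cases hj : j < (pvSlices pid fold).length
  · have h1 : ((PySem.List.pyRange 0 fold 1).map (fun _ => ([] : List String)))[j]?
        = some [] := by
      rw [List.getElem?_eq_getElem (by omega)]; simp
    rw [h1]
    rw [List.getElem?_map, List.getElem?_eq_getElem hj]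
    simp only [Option.map_some, List.nil_append]
    congr 1
    apply List.filter_congr
    intro t _
    rw [pv_buildIndex_getD, pv_contains_idxList _ _ _ hj]
  · have h1 : ((PySem.List.pyRange 0 fold 1).map (fun _ => ([] : List String)))[j]? = none := by
      rw [List.getElem?_eq_none_iff]; omega
    have h2 : ((pvSlices pid fold).map (fun fp => tid.filter (fun t => fp.contains (pvKey t))))[j]? = none := by
      rw [List.getElem?_eq_none_iff]; simp; omega
    rw [h1, h2]; rfl

-- ===== VERDICT (by name: the statement is the Claim_ definition above) =====
theorem folding_spec : Claim_equal_folding := by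
  intro pid tid fold _ _
  unfold Spec_folding
  rw [pv_folding_eq, pv_folding_alt_eq]
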